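-- pv_equiv track=rewrite | github.com/taggedzi/nonwordgen | nonwordgen/phonotactics.py | _has_ugly_patterns
-- ===== SOURCE A (Python) =====
-- def _has_ugly_patterns(word: str) -> bool:
--     """Return True if the candidate contains obviously ugly character runs."""
--     lowered = word.lower()
--     if len(lowered) < 3:
--         return False
--     for idx in range(len(lowered) - 2):
--         if lowered[idx] == lowered[idx + 1] == lowered[idx + 2]:
--             return True
--     if "qq" in lowered or "yyy" in lowered:
--         return True
--     return False
-- ===== SOURCE B (Python) =====
-- def _has_ugly_patterns(word: str) -> bool:
--     """Return True if the candidate contains obviously ugly character runs."""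
--     lowered = word.lower()
--     if len(lowered) < 3:
--         return False
--     if "qq" in lowered:
--         return True
--     prev = None
--     run = 0
--     for ch in lowered:
--         if ch == prev:
--             run += 1
--         else:
--             prev = ch
--             run = 1
--         if run >= 3:
--             return True
--     return False
-- ===== Notes on version B (the rewrite author's own statement) =====
-- stated objective: alternative
-- what changed: Replaces A's sliding three-index window scan plus its separate hard-coded triple-letter substring check with a single run-length-counting pass (tracking the current character and its run length); that special case is subsumed by any run of length 3.
import Mathlib
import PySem

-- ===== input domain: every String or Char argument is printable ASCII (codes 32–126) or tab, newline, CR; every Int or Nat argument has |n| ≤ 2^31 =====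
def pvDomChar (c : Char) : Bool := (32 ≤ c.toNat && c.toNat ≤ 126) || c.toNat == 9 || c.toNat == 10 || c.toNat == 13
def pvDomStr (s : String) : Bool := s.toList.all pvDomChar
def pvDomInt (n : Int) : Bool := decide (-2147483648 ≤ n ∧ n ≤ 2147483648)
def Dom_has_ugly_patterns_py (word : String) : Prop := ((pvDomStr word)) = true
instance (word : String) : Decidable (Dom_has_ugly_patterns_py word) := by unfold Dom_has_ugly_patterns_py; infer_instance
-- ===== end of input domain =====

-- B replaces A's three-index sliding-window scan (plus a hard-coded substring special case subsumed by it) by a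
-- single run-length-counting pass; same return value on every input (alternative decomposition).

-- ===== PORT A =====
def has_ugly_patterns_py (word : String) : Bool :=
  let lowered := PySem.Str.lower word
  if PySem.Str.len lowered < 3 then false
  else if (PySem.List.pyRange 0 (PySem.Str.len lowered - 2) 1).any (fun idx =>
        (PySem.Str.pyGet? lowered idx == PySem.Str.pyGet? lowered (idx + 1))
        && (PySem.Str.pyGet? lowered (idx + 1) == PySem.Str.pyGet? lowered (idx + 2)))
    then true
  else if PySem.Str.isIn "qq" lowered || PySem.Str.isIn "yyy" lowered then true
  else false

-- ===== PORT B =====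
-- B's for-loop with early return: state = (previous character, current run length)
def bRunLoop : List Char → Option Char → Nat → Bool
  | [], _, _ => false
  | ch :: rest, prev, run =>
    let (prev', run') := if some ch == prev then (prev, run + 1) else (some ch, 1)
    if 3 ≤ run' then true else bRunLoop rest prev' run'

def has_ugly_patterns_py_alt (word : String) : Bool :=
  let lowered := PySem.Str.lower word
  if PySem.Str.len lowered < 3 then false
  else if PySem.Str.isIn "qq" lowered then true
  else bRunLoop lowered.toList none 0

-- ===== PRECONDITION & SPEC =====
def Spec_has_ugly_patterns_py (word : String) (out : Bool) : Prop := out = has_ugly_patterns_py_alt word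
instance (word : String) (out : Bool) : Decidable (Spec_has_ugly_patterns_py word out) := by unfold Spec_has_ugly_patterns_py; infer_instance

-- ===== CLAIM (what is proved, stated in full; the proofs are below) =====
def Claim_equal_has_ugly_patterns_py : Prop := ∀ (word : String), Dom_has_ugly_patterns_py word → Spec_has_ugly_patterns_py word (has_ugly_patterns_py word)

-- ===== LEMMAS AND PROOFS =====

-- proof-only reference predicate: some character occurs three times in a row
def hasTriple : List Char → Bool
  | a :: b :: c :: rest => (a == b && b == c) || hasTriple (b :: c :: rest)
  | _ => false

-- B's loop seen through its invariant: with run length 1 (resp. 2) and previous char p,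
-- the loop detects exactly a triple of p :: l (for run 2 also a head equal to p).
theorem bRunLoop_run12 (l : List Char) : ∀ p : Char,
    bRunLoop l (some p) 1 = hasTriple (p :: l)
    ∧ bRunLoop l (some p) 2 = ((l.head? == some p) || hasTriple (p :: l)) := by
  induction l with
  | nil => intro p; simp [bRunLoop, hasTriple]
  | cons c rest ih =>
    intro p
    by_cases hcp : c = p
    · subst hcp
      refine ⟨?_, ?_⟩
      · rw [show bRunLoop (c :: rest) (some c) 1 = bRunLoop rest (some c) 2 from by
          rw [bRunLoop]; simp]
        rw [(ih c).2]
        cases rest with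
        | nil => simp [hasTriple]
        | cons d r =>
          by_cases hdc : d = c
          · subst hdc; simp [hasTriple]
          · have h1 : (d == c) = false := by simpa using hdc
            have h2 : (c == d) = false := by simpa using Ne.symm hdc
            simp [hasTriple, h1, h2]
      · rw [show bRunLoop (c :: rest) (some c) 2 = true from by rw [bRunLoop]; simp]
        simp
    · have step : ∀ r : Nat, bRunLoop (c :: rest) (some p) r = bRunLoop rest (some c) 1 := by
        intro r; rw [bRunLoop]; simp [hcp]
      refine ⟨?_, ?_⟩
      · rw [step 1, (ih c).1]
        cases rest with
        | nil => simp [hasTriple]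
        | cons d r =>
          have h2 : (p == c) = false := by simpa using Ne.symm hcp
          simp [hasTriple, h2]
      · rw [step 2, (ih c).1]
        cases rest with
        | nil => simp [hasTriple, hcp]
        | cons d r =>
          have h1 : (c == p) = false := by simpa using hcp
          have h2 : (p == c) = false := by simpa using Ne.symm hcp
          simp [hasTriple, h1, h2]

theorem bRunLoop_init (l : List Char) : bRunLoop l none 0 = hasTriple l := by
  cases l with
  | nil => rfl
  | cons c rest =>
    rw [show bRunLoop (c :: rest) none 0 = bRunLoop rest (some c) 1 from by
      rw [bRunLoop]; simp]
    exact (bRunLoop_run12 rest c).1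

theorem hasTriple_iff_idx (l : List Char) :
    hasTriple l = true ↔ ∃ k, k + 2 < l.length ∧ l[k]? = l[k+1]? ∧ l[k+1]? = l[k+2]? := by
  induction l with
  | nil => simp [hasTriple]
  | cons a tl ih =>
    match tl with
    | [] => simp [hasTriple]
    | [b] => simp [hasTriple]
    | b :: c :: rest =>
      rw [show hasTriple (a :: b :: c :: rest) = ((a == b && b == c) || hasTriple (b :: c :: rest)) from rfl]
      constructor
      · intro h
        rcases Bool.or_eq_true_iff.mp h with h1 | h2
        · exact ⟨0, by simp, by simpa using ⟨(beq_iff_eq.mp (Bool.and_eq_true_iff.mp h1).1), (beq_iff_eq.mp (Bool.and_eq_true_iff.mp h1).2)⟩⟩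
        · obtain ⟨k, hk, e1, e2⟩ := ih.mp h2
          exact ⟨k + 1, by simpa using hk, by simpa using e1, by simpa using e2⟩
      · rintro ⟨k, hk, e1, e2⟩
        cases k with
        | zero =>
          simp at e1 e2
          simp [e1, e2]
        | succ k' =>
          refine Bool.or_eq_true_iff.mpr (Or.inr (ih.mpr ⟨k', by simp at hk ⊢; omega, ?_, ?_⟩))
          · simpa using e1
          · simpa using e2

theorem hasTriple_of_infix {c : Char} {l : List Char} (h : [c, c, c] <:+: l) :
    hasTriple l = true := by
  obtain ⟨u, v, rfl⟩ := h
  rw [hasTriple_iff_idx]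
  refine ⟨u.length, by simp, ?_, ?_⟩ <;> simp

-- A's index-window any-scan is the same predicate
theorem anyWindow_eq_hasTriple (l : List Char) :
    ((PySem.List.pyRange 0 ((l.length : Int) - 2) 1).any (fun idx =>
        (PySem.List.pyGet? l idx == PySem.List.pyGet? l (idx + 1))
        && (PySem.List.pyGet? l (idx + 1) == PySem.List.pyGet? l (idx + 2)))) = hasTriple l := by
  rw [Bool.eq_iff_iff, List.any_eq_true, hasTriple_iff_idx]
  have cast12 : ∀ k : ℕ, ((k:Int) + 1) = ((k+1 : ℕ) : Int) ∧ ((k:Int) + 2) = ((k+2 : ℕ) : Int) := by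
    intro k; constructor <;> push_cast <;> ring
  constructor
  · rintro ⟨idx, hmem, hpred⟩
    rw [PySem.List.mem_pyRange_one] at hmem
    obtain ⟨h0, h2⟩ := hmem
    lift idx to ℕ using h0 with k
    rw [(cast12 k).1, (cast12 k).2] at hpred
    simp only [PySem.List.pyGet?_natCast] at hpred
    rw [Bool.and_eq_true, beq_iff_eq, beq_iff_eq] at hpred
    exact ⟨k, by omega, hpred.1, hpred.2⟩
  · rintro ⟨k, hk, e1, e2⟩
    refine ⟨(k : Int), PySem.List.mem_pyRange_one.mpr ⟨by omega, by omega⟩, ?_⟩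
    rw [(cast12 k).1, (cast12 k).2]
    simp only [PySem.List.pyGet?_natCast]
    rw [Bool.and_eq_true, beq_iff_eq, beq_iff_eq]
    exact ⟨e1, e2⟩

theorem has_ugly_eq_alt (word : String) : has_ugly_patterns_py word = has_ugly_patterns_py_alt word := by
  unfold has_ugly_patterns_py has_ugly_patterns_py_alt
  simp only [PySem.Str.len_eq, PySem.Str.pyGet?_eq, PySem.Str.isIn_eq,
    PySem.Chars.pyGet?_eq_listPyGet?, PySem.Str.toList_lower]
  generalize PySem.Chars.lower word.toList = l
  by_cases h3 : ((l.length : Int) < 3)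
  · rw [if_pos h3, if_pos h3]
  · rw [if_neg h3, if_neg h3, anyWindow_eq_hasTriple, bRunLoop_init]
    have hyy : PySem.Chars.isIn "yyy".toList l = true → hasTriple l = true := fun hy =>
      hasTriple_of_infix (by simpa using (PySem.Chars.isIn_iff_infix "yyy".toList l).mp hy)
    cases hq : PySem.Chars.isIn "qq".toList l <;>
      cases hy : PySem.Chars.isIn "yyy".toList l <;>
      cases hT : hasTriple l <;>
      simp_all

-- ===== VERDICT (by name: the statement is the Claim_ definition above) =====
theorem has_ugly_patterns_py_spec : Claim_equal_has_ugly_patterns_py := by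
  intro word _
  unfold Spec_has_ugly_patterns_py
  exact has_ugly_eq_alt word
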